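-- pv_equiv track=rewrite | github.com/Aoyanco123/Order-3-MIS | Lattice-Torus-Graph.py | count_maximal_independent_sets
-- ===== SOURCE A (Python) =====
-- def count_maximal_independent_sets(graph):
--
--     def is_order_3_maximal(graph, independent_set):
--
--         #Maximal check
--         for node in graph:
--             if node not in independent_set:
--                 if all(neighbor not in independent_set for neighbor in graph[node]):
--                     return False
--         return True
--
--         for vertex_to_remove in independent_set:
--
--             candidate_set = independent_set - {vertex_to_remove}
--
--             forbidden_vertices = set(candidate_set) | {neighbor for v in candidate_set for neighbor in graph[v]}
--             potential_additions = [v for v in graph if v not in forbidden_vertices]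
--
--             for v1 in range(len(potential_additions)):
--                 for v2 in range(v1 + 1, len(potential_additions)):
--                     extended_set = candidate_set | {potential_additions[v1], potential_additions[v2]}
--                     if is_independent_set(graph, extended_set):
--                         return False
--         return True
--
--     def is_independent_set(graph, independent_set):
--         for node in independent_set:
--             for neighbor in graph[node]:
--                 if neighbor in independent_set:
--                     return False
--         return True
--
--     def dfs(remaining_nodes, current_set):
--         if not remaining_nodes:
--             return 1 if is_order_3_maximal(graph, current_set) else 0
--
--         node = remaining_nodes[0]
--         rest = remaining_nodes[1:]
--
--         # Include node
--         include_set = current_set | {node}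
--         include_rest = [n for n in rest if n not in graph[node]]
--         count_with_node = dfs(include_rest, include_set)
--
--         # Exclude node
--         count_without_node = dfs(rest, current_set)
--
--         return count_with_node + count_without_node
--
--     nodes = list(graph.keys())
--     result = dfs(nodes, set())
--     return result
-- ===== SOURCE B (Python) =====
-- def count_maximal_independent_sets(graph):
--     # Build every independent set bottom-up with one pass over the keys,
--     # then count those whose non-members all have a chosen out-neighbor.
--     sets = [set()]
--     for node in graph:
--         added = []
--         for s in sets:
--             if all(node not in graph[u] for u in s):
--                 added.append(s | {node})
--         sets.extend(added)
--     count = 0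
--     for s in sets:
--         if all(k in s or any(nb in s for nb in graph[k]) for k in graph):
--             count += 1
--     return count
-- ===== Notes on version B (the rewrite author's own statement) =====
-- stated objective: alternative
-- what changed: Replaces A's binary include/exclude recursion (which prunes the remaining-node list at every include step) by a single iterative fold over the keys that grows one worklist of all independent sets, followed by a separate counting pass formulated with 'node dominated = in the set or has a chosen out-neighbor'.
import Mathlib
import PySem

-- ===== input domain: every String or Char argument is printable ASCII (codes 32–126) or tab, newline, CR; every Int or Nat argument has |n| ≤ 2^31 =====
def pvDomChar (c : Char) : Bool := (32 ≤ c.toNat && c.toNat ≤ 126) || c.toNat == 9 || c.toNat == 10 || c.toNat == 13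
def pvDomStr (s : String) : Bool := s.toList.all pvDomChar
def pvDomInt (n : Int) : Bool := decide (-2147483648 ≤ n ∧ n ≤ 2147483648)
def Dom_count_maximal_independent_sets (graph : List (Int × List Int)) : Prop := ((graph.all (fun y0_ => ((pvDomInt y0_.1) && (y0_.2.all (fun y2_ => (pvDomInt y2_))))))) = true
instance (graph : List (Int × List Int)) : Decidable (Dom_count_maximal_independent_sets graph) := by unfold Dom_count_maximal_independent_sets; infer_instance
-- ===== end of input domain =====

-- B replaces A's include/exclude recursion by one fold over the keys growing a
-- worklist of all independent sets plus a separate maximality-counting pass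
-- (alternative decomposition, same asymptotic cost).

-- ===== PORT A =====
-- `graph[k]` is ported as getD with default []: A only ever looks up keys of the
-- dict, so the default is never consulted (exact; A raises nowhere).
def pvAmaximal (g : PySem.Dict Int (List Int)) (s : PySem.Set Int) : Bool :=
  g.keys.all (fun node =>
    !(!decide (node ∈ s) && (g.getD node []).all (fun nb => !decide (nb ∈ s))))

def pvAdfs (g : PySem.Dict Int (List Int)) : List Int → PySem.Set Int → Int
  | [], cur => if pvAmaximal g cur then 1 else 0
  | node :: rest, cur =>
    pvAdfs g (rest.filter (fun n => !decide (n ∈ g.getD node []))) (PySem.Set.union cur [node])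
      + pvAdfs g rest cur
termination_by l _ => l.length
decreasing_by
  · simp only [List.length_unattach]
    exact Nat.lt_succ_of_le (le_trans (List.length_filter_le _ _) (by simp))
  · exact Nat.lt_succ_self _

def count_maximal_independent_sets (graph : List (Int × List Int)) : Int :=
  let g := PySem.Dict.ofList graph
  pvAdfs g g.keys PySem.Set.empty

-- ===== PORT B =====
def pvBaddable (g : PySem.Dict Int (List Int)) (s : PySem.Set Int) (node : Int) : Bool :=
  s.all (fun u => !decide (node ∈ g.getD u []))

def pvBstep (g : PySem.Dict Int (List Int)) (sets : List (PySem.Set Int)) (node : Int) :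
    List (PySem.Set Int) :=
  sets ++ (sets.filter (fun s => pvBaddable g s node)).map (fun s => PySem.Set.union s [node])

def pvBmaximal (g : PySem.Dict Int (List Int)) (s : PySem.Set Int) : Bool :=
  g.keys.all (fun k => decide (k ∈ s) || (g.getD k []).any (fun nb => decide (nb ∈ s)))

def count_maximal_independent_sets_alt (graph : List (Int × List Int)) : Int :=
  let g := PySem.Dict.ofList graph
  let sets := g.keys.foldl (pvBstep g) [PySem.Set.empty]
  sets.foldl (fun c s => if pvBmaximal g s then c + 1 else c) (0 : Int)

-- ===== PRECONDITION & SPEC =====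
def Spec_count_maximal_independent_sets (graph : List (Int × List Int)) (out : Int) : Prop := out = count_maximal_independent_sets_alt graph
instance (graph : List (Int × List Int)) (out : Int) : Decidable (Spec_count_maximal_independent_sets graph out) := by unfold Spec_count_maximal_independent_sets; infer_instance

-- ===== CLAIM (what is proved, stated in full; the proofs are below) =====
def Claim_equal_count_maximal_independent_sets : Prop := ∀ (graph : List (Int × List Int)), Dom_count_maximal_independent_sets graph → Spec_count_maximal_independent_sets graph (count_maximal_independent_sets graph)

-- ===== LEMMAS AND PROOFS =====

-- ghost list of the independent sets A's dfs visits at its leaves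
def pvExt (g : PySem.Dict Int (List Int)) : List Int → PySem.Set Int → List (PySem.Set Int)
  | [], cur => [cur]
  | node :: rest, cur =>
    pvExt g (rest.filter (fun n => !decide (n ∈ g.getD node []))) (PySem.Set.union cur [node])
      ++ pvExt g rest cur
termination_by l _ => l.length
decreasing_by
  · simp only [List.length_unattach]
    exact Nat.lt_succ_of_le (le_trans (List.length_filter_le _ _) (by simp))
  · exact Nat.lt_succ_self _

theorem pv_union_singleton (s : PySem.Set Int) (n : Int) :
    PySem.Set.union s [n] = PySem.Set.add s n := rfl

theorem pv_dfs_eq_countP (g : PySem.Dict Int (List Int)) (l : List Int) (S : PySem.Set Int) :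
    pvAdfs g l S = ((pvExt g l S).countP (fun s => pvAmaximal g s) : Int) := by
  induction l, S using pvExt.induct g with
  | case1 cur => simp [pvAdfs, pvExt, List.countP_cons]
  | case2 node rest cur ih1 ih2 =>
    rw [pvAdfs, pvExt, List.countP_append]
    rw [List.unattach_filter (g := fun n => !decide (n ∈ g.getD node [])) (hf := fun x h => rfl)] at ih1
    simp only [List.unattach_attach] at ih1
    rw [ih1, ih2]
    push_cast; ring

theorem pv_all_add (s : PySem.Set Int) (n : Int) (p : Int → Bool) :
    (PySem.Set.add s n).all p = (s.all p && p n) := by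
  by_cases h : n ∈ s
  · rw [PySem.Set.add_of_mem h]
    cases hp : s.all p with
    | false => simp
    | true => simp only [Bool.true_and]; exact (List.all_eq_true.mp hp n h).symm
  · rw [PySem.Set.add_of_not_mem h]; simp

theorem pv_addable_add (g : PySem.Dict Int (List Int)) (T : PySem.Set Int) (n x : Int) :
    pvBaddable g (PySem.Set.add T n) x = (pvBaddable g T x && !decide (x ∈ g.getD n [])) := by
  unfold pvBaddable; exact pv_all_add T n _

theorem pv_step_perm (g : PySem.Dict Int (List Int)) {L1 L2 : List (PySem.Set Int)}
    (h : L1.Perm L2) (n : Int) : (pvBstep g L1 n).Perm (pvBstep g L2 n) :=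
  h.append ((h.filter _).map _)

theorem pv_foldB_perm (g : PySem.Dict Int (List Int)) (ns : List Int)
    {L1 L2 : List (PySem.Set Int)} (h : L1.Perm L2) :
    (ns.foldl (pvBstep g) L1).Perm (ns.foldl (pvBstep g) L2) := by
  induction ns generalizing L1 L2 with
  | nil => exact h
  | cons n ns ih => exact ih (pv_step_perm g h n)

theorem pv_foldB_append (g : PySem.Dict Int (List Int)) (ns : List Int)
    (L1 L2 : List (PySem.Set Int)) :
    (ns.foldl (pvBstep g) (L1 ++ L2)).Perm
      (ns.foldl (pvBstep g) L1 ++ ns.foldl (pvBstep g) L2) := by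
  induction ns generalizing L1 L2 with
  | nil => exact List.Perm.refl _
  | cons n ns ih =>
    have hstep : (pvBstep g (L1 ++ L2) n).Perm (pvBstep g L1 n ++ pvBstep g L2 n) := by
      unfold pvBstep
      rw [List.filter_append, List.map_append]
      rw [← Multiset.coe_eq_coe]
      simp only [← Multiset.coe_add]
      abel
    simp only [List.foldl_cons]
    exact ((pv_foldB_perm g ns hstep).trans (ih _ _))

theorem pv_foldB_ext (g : PySem.Dict Int (List Int)) (ns : List Int) (T : PySem.Set Int) :
    (ns.foldl (pvBstep g) [T]).Perm (pvExt g (ns.filter (pvBaddable g T)) T) := by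
  induction ns generalizing T with
  | nil => simp [pvExt]
  | cons n ns ih =>
    by_cases h : pvBaddable g T n = true
    · have hstep : pvBstep g [T] n = [T] ++ [PySem.Set.add T n] := by
        simp [pvBstep, h, pv_union_singleton]
      have hfilter : ns.filter (pvBaddable g (PySem.Set.add T n)) =
          (ns.filter (pvBaddable g T)).filter (fun x => !decide (x ∈ g.getD n [])) := by
        rw [List.filter_filter]
        refine List.filter_congr (fun x _ => ?_)
        rw [pv_addable_add g T n x, Bool.and_comm]
      rw [List.foldl_cons, hstep, List.filter_cons_of_pos h, pvExt, pv_union_singleton]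
      refine (pv_foldB_append g ns _ _).trans ?_
      refine ((ih T).append (ih (PySem.Set.add T n))).trans ?_
      rw [hfilter]
      exact List.perm_append_comm
    · have hstep : pvBstep g [T] n = [T] := by simp [pvBstep, h]
      rw [List.foldl_cons, hstep, List.filter_cons_of_neg (by simp [h])]
      exact ih T

theorem pv_max_eq (g : PySem.Dict Int (List Int)) (s : PySem.Set Int) :
    pvAmaximal g s = pvBmaximal g s := by
  unfold pvAmaximal pvBmaximal
  refine List.all_congr rfl (fun node => ?_)
  cases h : decide (node ∈ s) with
  | true => simp [h]
  | false =>
    simp only [Bool.not_false, Bool.true_and, Bool.false_or]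
    induction (g.getD node []) with
    | nil => simp
    | cons a l ihl => cases ha : decide (a ∈ s) <;> simp [ha, ihl]

theorem pv_foldl_count (p : PySem.Set Int → Bool) (sets : List (PySem.Set Int)) (c : Int) :
    sets.foldl (fun c s => if p s then c + 1 else c) c = c + (sets.countP p : Int) := by
  induction sets generalizing c with
  | nil => simp
  | cons s sets ih =>
    rw [List.foldl_cons, ih, List.countP_cons]
    cases h : p s <;> simp [h] <;> ring

theorem pv_addable_empty (g : PySem.Dict Int (List Int)) (n : Int) :
    pvBaddable g PySem.Set.empty n = true := rfl

-- ===== VERDICT (by name: the statement is the Claim_ definition above) =====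
theorem count_maximal_independent_sets_spec : Claim_equal_count_maximal_independent_sets := by
  intro graph _
  unfold Spec_count_maximal_independent_sets
  unfold count_maximal_independent_sets count_maximal_independent_sets_alt
  set g := PySem.Dict.ofList graph with hg
  rw [pv_dfs_eq_countP, pv_foldl_count]
  have hperm : (g.keys.foldl (pvBstep g) [PySem.Set.empty]).Perm
      (pvExt g g.keys PySem.Set.empty) := by
    have h2 := pv_foldB_ext g g.keys PySem.Set.empty
    rwa [List.filter_congr (fun x _ => pv_addable_empty g x), List.filter_true] at h2
  rw [hperm.countP_eq]
  rw [List.countP_congr (fun s _ => by rw [pv_max_eq])]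
  simp
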